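-- pv_equiv track=rewrite | github.com/CharlesBird/Resources | coding/code.py | fn5
-- ===== SOURCE A (Python) =====
-- def fn5(num, n=5):
--     # 循环五次
--     l = []
--     s = num * n
--     remain = 100 - s
--     min_val = num + 1
--     max_val = remain - (9-n)*num + 1
--     for i in range(min_val, max_val):
--         if remain - i < i * (9 - n):
--             break
--         for j in range(i, max_val):
--             if remain - i - j < j * (8 - n):
--                 break
--             for k in range(j, max_val):
--                 if remain - i - j - k < k * (7 - n):
--                     break
--                 for a in range(k, max_val):
--                     if remain - i - j - k - a < a * (6 - n):
--                         break
--                     b = remain - (i + j + k + a)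
--                     if b >= a:
--                         l.append((i, j, k, a, b))
--     return l
-- ===== SOURCE B (Python) =====
-- def fn5(num, n=5):
--     remain = 100 - num * n
--     max_val = remain - (9 - n) * num + 1
--
--     def upper(lo, rem, c1):
--         if c1 > 0:
--             return min(max_val, rem // c1 + 1)
--         if c1 == 0:
--             return max_val if rem >= 0 else lo
--         return max_val if lo * c1 <= rem else lo
--
--     def rec(t, lo, rem, prefix):
--         if t == 5:
--             if rem >= lo:
--                 yield prefix + (rem,)
--             return
--         c1 = 11 - t - n
--         for x in range(lo, upper(lo, rem, c1)):
--             yield from rec(t + 1, x, rem - x, prefix + (x,))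
--
--     return list(rec(1, num + 1, remain, ()))
-- ===== Notes on version B (the rewrite author's own statement) =====
-- stated objective: alternative
-- what changed: A's four nested loops with per-iteration break tests are replaced by one recursive enumerator whose per-level range bound is computed arithmetically up front (floor division / sign analysis of the break coefficient), so no break logic remains.
import Mathlib
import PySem

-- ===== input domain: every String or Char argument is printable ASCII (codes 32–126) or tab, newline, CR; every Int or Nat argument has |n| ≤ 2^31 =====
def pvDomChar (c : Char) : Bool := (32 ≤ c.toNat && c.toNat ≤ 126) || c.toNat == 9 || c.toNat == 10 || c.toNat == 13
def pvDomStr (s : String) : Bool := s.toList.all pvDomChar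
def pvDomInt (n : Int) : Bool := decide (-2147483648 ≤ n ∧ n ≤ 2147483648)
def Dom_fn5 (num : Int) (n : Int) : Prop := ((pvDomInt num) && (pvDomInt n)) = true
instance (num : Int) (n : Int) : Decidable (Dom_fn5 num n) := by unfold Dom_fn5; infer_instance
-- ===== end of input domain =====

-- B replaces A's four nested break-pruned loops by one recursive enumerator whose
-- per-level loop bound is computed arithmetically (objective: alternative, not faster).

-- ===== PORT A =====
-- innermost loop: for a in range(k, max_val) with its break and conditional append
def loopA (n remain i j k : Int) : List Int → List (Int × Int × Int × Int × Int) → List (Int × Int × Int × Int × Int)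
  | [], l => l
  | a :: rest, l =>
    if remain - i - j - k - a < a * (6 - n) then l
    else
      let b := remain - (i + j + k + a)
      loopA n remain i j k rest (if b ≥ a then l ++ [(i, j, k, a, b)] else l)

def loopK (n remain maxVal i j : Int) : List Int → List (Int × Int × Int × Int × Int) → List (Int × Int × Int × Int × Int)
  | [], l => l
  | k :: rest, l =>
    if remain - i - j - k < k * (7 - n) then l
    else loopK n remain maxVal i j rest (loopA n remain i j k (PySem.List.pyRange k maxVal 1) l)

def loopJ (n remain maxVal i : Int) : List Int → List (Int × Int × Int × Int × Int) → List (Int × Int × Int × Int × Int)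
  | [], l => l
  | j :: rest, l =>
    if remain - i - j < j * (8 - n) then l
    else loopJ n remain maxVal i rest (loopK n remain maxVal i j (PySem.List.pyRange j maxVal 1) l)

def loopI (n remain maxVal : Int) : List Int → List (Int × Int × Int × Int × Int) → List (Int × Int × Int × Int × Int)
  | [], l => l
  | i :: rest, l =>
    if remain - i < i * (9 - n) then l
    else loopI n remain maxVal rest (loopJ n remain maxVal i (PySem.List.pyRange i maxVal 1) l)

def fn5 (num : Int) (n : Int) : List (Int × Int × Int × Int × Int) :=
  let l : List (Int × Int × Int × Int × Int) := []
  let s := num * n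
  let remain := 100 - s
  let minVal := num + 1
  let maxVal := remain - (9 - n) * num + 1
  loopI n remain maxVal (PySem.List.pyRange minVal maxVal 1) l

-- ===== PORT B =====
-- upper(lo, rem, c1) of Source B
def altUpper (maxVal lo rem c1 : Int) : Int :=
  if c1 > 0 then min maxVal (PySem.Int.floordiv rem c1 + 1)
  else if c1 = 0 then (if rem ≥ 0 then maxVal else lo)
  else (if lo * c1 ≤ rem then maxVal else lo)

-- Python's tuple(t) on the 5-element list (every produced list has length 5)
def toTup5 (t : List Int) : Int × Int × Int × Int × Int :=
  match t with
  | [i, j, k, a, b] => (i, j, k, a, b)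
  | _ => (0, 0, 0, 0, 0)

-- rec(t, lo, rem, prefix) of Source B, a recursive generator: its yielded sequence is
-- this list; fuel = 5 - t, so c1 = 11 - t - n = 7 + fuel' - n at fuel = fuel' + 1;
-- the Python tuple prefix is carried as a List Int, turned into the 5-tuple by toTup5 at the leaf
def altRec (n maxVal : Int) : Nat → Int → Int → List Int → List (Int × Int × Int × Int × Int)
  | 0, lo, rem, pfx => if rem ≥ lo then [toTup5 (pfx ++ [rem])] else []
  | f + 1, lo, rem, pfx =>
    (PySem.List.pyRange lo (altUpper maxVal lo rem (7 + (f : Int) - n)) 1).flatMap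
      (fun x => altRec n maxVal f x (rem - x) (pfx ++ [x]))

def fn5_alt (num : Int) (n : Int) : List (Int × Int × Int × Int × Int) :=
  let remain := 100 - num * n
  let maxVal := remain - (9 - n) * num + 1
  altRec n maxVal 4 (num + 1) remain []

-- ===== PRECONDITION & SPEC =====
def Spec_fn5 (num : Int) (n : Int) (out : List (Int × Int × Int × Int × Int)) : Prop := out = fn5_alt num n
instance (num : Int) (n : Int) (out : List (Int × Int × Int × Int × Int)) : Decidable (Spec_fn5 num n out) := by unfold Spec_fn5; infer_instance

-- ===== CLAIM (what is proved, stated in full; the proofs are below) =====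
def Claim_equal_fn5 : Prop := ∀ (num : Int) (n : Int), Dom_fn5 num n → Spec_fn5 num n (fn5 num n)

-- ===== LEMMAS AND PROOFS =====

-- a break-terminated for-loop over an increasing range equals a plain loop over a truncated range
lemma takeWhile_pyRange_of (P : Int → Bool) :
    ∀ (d : Nat) (lo hi b : Int), hi - lo ≤ (d : Int) → b ≤ hi →
    (∀ x, lo ≤ x → x < b → P x = true) → (max b lo < hi → P (max b lo) = false) →
    (PySem.List.pyRange lo hi 1).takeWhile P = PySem.List.pyRange lo b 1 := by
  intro d
  induction d with
  | zero =>
    intro lo hi b hd hb h1 h2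
    rw [PySem.List.pyRange_one_eq_nil (by omega), PySem.List.pyRange_one_eq_nil (by omega)]
    rfl
  | succ d ih =>
    intro lo hi b hd hb h1 h2
    by_cases hlh : lo < hi
    · rw [PySem.List.pyRange_one_cons hlh]
      by_cases hPl : P lo = true
      · have hlb : lo < b := by
          by_contra h
          have hmx : max b lo = lo := by omega
          have := h2 (by omega)
          rw [hmx] at this
          simp [this] at hPl
        rw [List.takeWhile_cons, hPl]
        simp only [ite_true]
        rw [ih (lo + 1) hi b (by omega) hb (fun x hx1 hx2 => h1 x (by omega) hx2)
            (by intro hx; have hmx : max b (lo + 1) = max b lo := by omega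
                rw [hmx] at hx ⊢; exact h2 hx),
            PySem.List.pyRange_one_cons hlb]
      · have hble : b ≤ lo := by
          by_contra h
          exact hPl (h1 lo le_rfl (by omega))
        have hPl' : P lo = false := by simpa using hPl
        rw [PySem.List.pyRange_one_eq_nil hble, List.takeWhile_cons, hPl']
        rfl
    · rw [PySem.List.pyRange_one_eq_nil (by omega), PySem.List.pyRange_one_eq_nil (by omega)]
      rfl

lemma takeWhile_upper (lo hi rem c1 : Int) :
    (PySem.List.pyRange lo hi 1).takeWhile (fun x => decide (x * c1 ≤ rem))
      = PySem.List.pyRange lo (altUpper hi lo rem c1) 1 := by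
  by_cases hlh : lo < hi
  · rcases lt_trichotomy c1 0 with hc | hc | hc
    · unfold altUpper
      rw [if_neg (by omega), if_neg (by omega)]
      by_cases hok : lo * c1 ≤ rem
      · rw [if_pos hok]
        apply takeWhile_pyRange_of _ (hi - lo).toNat lo hi hi (by omega) le_rfl
        · intro x hx1 _
          have : x * c1 ≤ lo * c1 := mul_le_mul_of_nonpos_right hx1 (by omega)
          simp; omega
        · intro hx; omega
      · rw [if_neg hok]
        apply takeWhile_pyRange_of _ (hi - lo).toNat lo hi lo (by omega) (by omega)
        · intro x hx1 hx2; omega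
        · intro _
          have hmx : max lo lo = lo := by omega
          rw [hmx]
          simp; omega
    · subst hc
      unfold altUpper
      rw [if_neg (by omega), if_pos rfl]
      by_cases hr : rem ≥ 0
      · rw [if_pos hr]
        apply takeWhile_pyRange_of _ (hi - lo).toNat lo hi hi (by omega) le_rfl
        · intro x _ _; simp; omega
        · intro hx; omega
      · rw [if_neg hr]
        apply takeWhile_pyRange_of _ (hi - lo).toNat lo hi lo (by omega) (by omega)
        · intro x hx1 hx2; omega
        · intro _
          have hmx : max lo lo = lo := by omega
          rw [hmx]
          simp; omega
    · unfold altUpper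
      rw [if_pos hc]
      have hiff : ∀ x : Int, x * c1 ≤ rem ↔ x ≤ PySem.Int.floordiv rem c1 := by
        intro x
        rw [PySem.Int.le_floordiv_iff_mul_le hc]
      apply takeWhile_pyRange_of _ (hi - lo).toNat lo hi _ (by omega) (by omega)
      · intro x _ hx2
        simp only [decide_eq_true_eq, hiff]
        omega
      · intro hx
        simp only [decide_eq_false_iff_not, hiff]
        omega
  · rw [PySem.List.pyRange_one_eq_nil (by omega), PySem.List.pyRange_one_eq_nil]
    · rfl
    · unfold altUpper
      split_ifs <;> omega

-- proof-side pure enumerator: the list of suffix-lists rec would have produced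
def enumRec (n maxVal : Int) : Nat → Int → Int → List (List Int)
  | 0, lo, rem => if rem ≥ lo then [[rem]] else []
  | f + 1, lo, rem =>
    (PySem.List.pyRange lo (altUpper maxVal lo rem (7 + (f : Int) - n)) 1).flatMap
      (fun x => (enumRec n maxVal f x (rem - x)).map (fun tail => x :: tail))

-- B's generator recursion in terms of the pure enumerator
lemma altRec_eq (n maxVal : Int) :
    ∀ (f : Nat) (lo rem : Int) (pfx : List Int),
    altRec n maxVal f lo rem pfx
      = (enumRec n maxVal f lo rem).map (fun t => toTup5 (pfx ++ t)) := by
  intro f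
  induction f with
  | zero =>
    intro lo rem pfx
    rw [altRec, enumRec]
    split_ifs <;> simp
  | succ f ih =>
    intro lo rem pfx
    rw [altRec, enumRec, List.map_flatMap]
    apply List.flatMap_congr
    intro x _
    rw [ih, List.map_map]
    apply List.map_congr_left
    intro t _
    simp

lemma loopA_break (n remain i j k : Int) (xs : List Int) (l : List (Int × Int × Int × Int × Int)) :
    loopA n remain i j k xs l
      = l ++ (xs.takeWhile (fun a => decide (a * (7 - n) ≤ remain - i - j - k))).flatMap
          (fun a => if remain - (i + j + k + a) ≥ a then [(i, j, k, a, remain - (i + j + k + a))] else []) := by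
  induction xs generalizing l with
  | nil => simp [loopA]
  | cons a rest ih =>
    rw [loopA, List.takeWhile_cons]
    have harith : a * (7 - n) = a * (6 - n) + a := by ring
    by_cases hcond : remain - i - j - k - a < a * (6 - n)
    · rw [if_pos hcond]
      have : ¬ (a * (7 - n) ≤ remain - i - j - k) := by omega
      simp [this]
    · rw [if_neg hcond]
      have hP : (a * (7 - n) ≤ remain - i - j - k) := by omega
      simp only [hP, decide_true, ite_true, List.flatMap_cons]
      rw [ih]
      by_cases hb : remain - (i + j + k + a) ≥ a
      · rw [if_pos hb, if_pos hb, List.append_assoc]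
      · rw [if_neg hb, if_neg hb]
        simp

lemma loopA_eq (n remain maxVal i j k : Int) (lo : Int) (l : List (Int × Int × Int × Int × Int)) :
    loopA n remain i j k (PySem.List.pyRange lo maxVal 1) l
      = l ++ (enumRec n maxVal 1 lo (remain - i - j - k)).map (fun t => toTup5 (i :: j :: k :: t)) := by
  rw [loopA_break, takeWhile_upper, enumRec]
  congr 1
  rw [List.map_flatMap]
  have hc : (7 : Int) + ((0 : Nat) : Int) - n = 7 - n := by push_cast; ring
  rw [hc]
  apply List.flatMap_congr
  intro a _
  have h5 : remain - (i + j + k + a) = remain - i - j - k - a := by ring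
  rw [enumRec]
  by_cases hb : remain - i - j - k - a ≥ a
  · rw [if_pos hb, if_pos (by omega)]
    simp [toTup5, h5]
  · rw [if_neg hb, if_neg (by omega)]
    simp

lemma loopK_break (n remain maxVal i j : Int) (xs : List Int) (l : List (Int × Int × Int × Int × Int)) :
    loopK n remain maxVal i j xs l
      = l ++ (xs.takeWhile (fun k => decide (k * (8 - n) ≤ remain - i - j))).flatMap
          (fun k => (enumRec n maxVal 1 k (remain - i - j - k)).map (fun t => toTup5 (i :: j :: k :: t))) := by
  induction xs generalizing l with
  | nil => simp [loopK]
  | cons k rest ih =>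
    rw [loopK, List.takeWhile_cons]
    have harith : k * (8 - n) = k * (7 - n) + k := by ring
    by_cases hcond : remain - i - j - k < k * (7 - n)
    · rw [if_pos hcond]
      have : ¬ (k * (8 - n) ≤ remain - i - j) := by omega
      simp [this]
    · rw [if_neg hcond]
      have hP : (k * (8 - n) ≤ remain - i - j) := by omega
      simp only [hP, decide_true, ite_true, List.flatMap_cons]
      rw [ih, loopA_eq, List.append_assoc]

lemma loopK_eq (n remain maxVal i j : Int) (lo : Int) (l : List (Int × Int × Int × Int × Int)) :
    loopK n remain maxVal i j (PySem.List.pyRange lo maxVal 1) l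
      = l ++ (enumRec n maxVal 2 lo (remain - i - j)).map (fun t => toTup5 (i :: j :: t)) := by
  rw [loopK_break, takeWhile_upper, enumRec]
  congr 1
  rw [List.map_flatMap]
  have hc : (7 : Int) + ((1 : Nat) : Int) - n = 8 - n := by push_cast; ring
  rw [hc]
  apply List.flatMap_congr
  intro k _
  rw [List.map_map]
  congr 1

lemma loopJ_break (n remain maxVal i : Int) (xs : List Int) (l : List (Int × Int × Int × Int × Int)) :
    loopJ n remain maxVal i xs l
      = l ++ (xs.takeWhile (fun j => decide (j * (9 - n) ≤ remain - i))).flatMap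
          (fun j => (enumRec n maxVal 2 j (remain - i - j)).map (fun t => toTup5 (i :: j :: t))) := by
  induction xs generalizing l with
  | nil => simp [loopJ]
  | cons j rest ih =>
    rw [loopJ, List.takeWhile_cons]
    have harith : j * (9 - n) = j * (8 - n) + j := by ring
    by_cases hcond : remain - i - j < j * (8 - n)
    · rw [if_pos hcond]
      have : ¬ (j * (9 - n) ≤ remain - i) := by omega
      simp [this]
    · rw [if_neg hcond]
      have hP : (j * (9 - n) ≤ remain - i) := by omega
      simp only [hP, decide_true, ite_true, List.flatMap_cons]
      rw [ih, loopK_eq, List.append_assoc]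

lemma loopJ_eq (n remain maxVal i : Int) (lo : Int) (l : List (Int × Int × Int × Int × Int)) :
    loopJ n remain maxVal i (PySem.List.pyRange lo maxVal 1) l
      = l ++ (enumRec n maxVal 3 lo (remain - i)).map (fun t => toTup5 (i :: t)) := by
  rw [loopJ_break, takeWhile_upper, enumRec]
  congr 1
  rw [List.map_flatMap]
  have hc : (7 : Int) + ((2 : Nat) : Int) - n = 9 - n := by push_cast; ring
  rw [hc]
  apply List.flatMap_congr
  intro j _
  rw [List.map_map]
  congr 1

lemma loopI_break (n remain maxVal : Int) (xs : List Int) (l : List (Int × Int × Int × Int × Int)) :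
    loopI n remain maxVal xs l
      = l ++ (xs.takeWhile (fun i => decide (i * (10 - n) ≤ remain))).flatMap
          (fun i => (enumRec n maxVal 3 i (remain - i)).map (fun t => toTup5 (i :: t))) := by
  induction xs generalizing l with
  | nil => simp [loopI]
  | cons i rest ih =>
    rw [loopI, List.takeWhile_cons]
    have harith : i * (10 - n) = i * (9 - n) + i := by ring
    by_cases hcond : remain - i < i * (9 - n)
    · rw [if_pos hcond]
      have : ¬ (i * (10 - n) ≤ remain) := by omega
      simp [this]
    · rw [if_neg hcond]
      have hP : (i * (10 - n) ≤ remain) := by omega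
      simp only [hP, decide_true, ite_true, List.flatMap_cons]
      rw [ih, loopJ_eq, List.append_assoc]

lemma loopI_eq (n remain maxVal : Int) (lo : Int) (l : List (Int × Int × Int × Int × Int)) :
    loopI n remain maxVal (PySem.List.pyRange lo maxVal 1) l
      = l ++ (enumRec n maxVal 4 lo remain).map toTup5 := by
  rw [loopI_break, takeWhile_upper, enumRec]
  congr 1
  rw [List.map_flatMap]
  have hc : (7 : Int) + ((3 : Nat) : Int) - n = 10 - n := by push_cast; ring
  rw [hc]
  apply List.flatMap_congr
  intro i _
  rw [List.map_map]
  congr 1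

-- ===== VERDICT (by name: the statement is the Claim_ definition above) =====
theorem fn5_spec : Claim_equal_fn5 := by
  intro num n _
  unfold Spec_fn5 fn5 fn5_alt
  rw [loopI_eq, altRec_eq]
  simp
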